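-- pv_equiv track=rewrite | github.com/himanshusaini11/DataStructureAlgorithms | 02-Hashing/02-FindUniqueNums.py | findUniqueNums
-- ===== SOURCE A (Python) =====
-- from typing import List
--
-- def findUniqueNums(nums: List[int]) -> List[int]:
--     temp = set(nums)
--     result = []
--     for i in range(0, len(nums)):
--         if (nums[i] + 1 not in temp) and (nums[i] - 1 not in temp):
--             result.append(nums[i])
--         else:
--             temp.add(nums[i])
--     return result
-- ===== SOURCE B (Python) =====
-- from typing import List
--
-- def findUniqueNums(nums: List[int]) -> List[int]:
--     vals = sorted(set(nums))
--     lonely = set()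
--     for i in range(len(vals)):
--         if (i == 0 or vals[i - 1] != vals[i] - 1) and \
--            (i == len(vals) - 1 or vals[i + 1] != vals[i] + 1):
--             lonely.add(vals[i])
--     return [x for x in nums if x in lonely]
-- ===== Notes on version B (the rewrite author's own statement) =====
-- stated objective: alternative
-- what changed: Replaces the per-element hash-membership loop (with its no-op set re-insertion) by deduplicating and sorting the values once, marking a value lonely when its sorted neighbours are not v-1/v+1 in a single scan, then filtering nums against the lonely set.
import Mathlib
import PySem

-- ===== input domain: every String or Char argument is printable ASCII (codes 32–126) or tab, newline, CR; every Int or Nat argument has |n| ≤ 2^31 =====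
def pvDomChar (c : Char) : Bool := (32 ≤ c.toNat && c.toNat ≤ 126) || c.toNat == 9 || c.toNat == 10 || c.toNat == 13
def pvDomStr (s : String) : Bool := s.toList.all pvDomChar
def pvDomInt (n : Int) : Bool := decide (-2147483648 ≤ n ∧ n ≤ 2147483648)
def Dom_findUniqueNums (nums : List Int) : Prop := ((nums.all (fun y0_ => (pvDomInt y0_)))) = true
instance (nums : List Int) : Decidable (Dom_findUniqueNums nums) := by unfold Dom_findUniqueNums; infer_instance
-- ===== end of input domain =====

-- B dedupes+sorts the values, marks a value lonely when its sorted neighbours are not v-1/v+1, and filters nums; alternative decomposition, same result.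

-- ===== PORT A =====
-- temp = set(nums); loop over indices, append or (no-op) re-add to temp
def findUniqueNums (nums : List Int) : List Int :=
  let st := (PySem.List.pyRange 0 (nums.length : Int) 1).foldl
    (fun (st : PySem.Set Int × List Int) i =>
      let x := PySem.List.pyGetD nums i 0
      if !(st.1.contains (x + 1)) && !(st.1.contains (x - 1)) then
        (st.1, st.2 ++ [x])
      else
        (PySem.Set.add st.1 x, st.2))
    (PySem.Set.ofList nums, [])
  st.2

-- ===== PORT B =====
def findUniqueNums_alt (nums : List Int) : List Int :=
  let vals : List Int := PySem.List.sorted (PySem.Set.ofList nums) (fun x => x) false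
  let lonely : PySem.Set Int := (PySem.List.pyRange 0 (vals.length : Int) 1).foldl
    (fun (s : PySem.Set Int) i =>
      if (i == 0 || !(PySem.List.pyGetD vals (i - 1) 0 == PySem.List.pyGetD vals i 0 - 1)) &&
         (i == (vals.length : Int) - 1 || !(PySem.List.pyGetD vals (i + 1) 0 == PySem.List.pyGetD vals i 0 + 1)) then
        PySem.Set.add s (PySem.List.pyGetD vals i 0)
      else s)
    PySem.Set.empty
  nums.filter (fun x => lonely.contains x)

-- ===== PRECONDITION & SPEC =====
def Spec_findUniqueNums (nums : List Int) (out : List Int) : Prop := out = findUniqueNums_alt nums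
instance (nums : List Int) (out : List Int) : Decidable (Spec_findUniqueNums nums out) := by unfold Spec_findUniqueNums; infer_instance

-- ===== CLAIM (what is proved, stated in full; the proofs are below) =====
def Claim_equal_findUniqueNums : Prop := ∀ (nums : List Int), Dom_findUniqueNums nums → Spec_findUniqueNums nums (findUniqueNums nums)

-- ===== LEMMAS AND PROOFS =====


theorem aFold_filter (l : List Int) (s : PySem.Set Int) (acc : List Int)
    (h : ∀ x ∈ l, s.contains x = true) :
    (l.foldl (fun (st : PySem.Set Int × List Int) x =>
      if !(st.1.contains (x + 1)) && !(st.1.contains (x - 1)) then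
        (st.1, st.2 ++ [x])
      else (PySem.Set.add st.1 x, st.2)) (s, acc))
    = (s, acc ++ l.filter (fun x => !(s.contains (x + 1)) && !(s.contains (x - 1)))) := by
  induction l generalizing acc with
  | nil => simp
  | cons x l ih =>
    have hx : PySem.Set.add s x = s := by
      have := h x (by simp)
      simp [PySem.Set.add, PySem.Set.contains] at *; simp [this]
    have h' : ∀ y ∈ l, s.contains y = true := fun y hy => h y (by simp [hy])
    by_cases hc : (!(s.contains (x + 1)) && !(s.contains (x - 1))) = true
    · simp only [List.foldl_cons, List.filter_cons, if_pos hc]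
      rw [ih _ h']
      simp
    · simp only [List.foldl_cons, List.filter_cons, if_neg hc]
      rw [hx, ih _ h']

theorem lonelyFold_mem (idxs : List Int) (vals : List Int) (s : PySem.Set Int) (x : Int) :
    (x ∈ idxs.foldl (fun (s : PySem.Set Int) i =>
      if (i == 0 || !(PySem.List.pyGetD vals (i - 1) 0 == PySem.List.pyGetD vals i 0 - 1)) &&
         (i == (vals.length : Int) - 1 || !(PySem.List.pyGetD vals (i + 1) 0 == PySem.List.pyGetD vals i 0 + 1)) then
        PySem.Set.add s (PySem.List.pyGetD vals i 0)
      else s) s)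
    ↔ x ∈ s ∨ ∃ i ∈ idxs,
        ((i == 0 || !(PySem.List.pyGetD vals (i - 1) 0 == PySem.List.pyGetD vals i 0 - 1)) &&
         (i == (vals.length : Int) - 1 || !(PySem.List.pyGetD vals (i + 1) 0 == PySem.List.pyGetD vals i 0 + 1))) = true
        ∧ PySem.List.pyGetD vals i 0 = x := by
  induction idxs generalizing s with
  | nil => simp
  | cons i idxs ih =>
    simp only [List.foldl_cons, ih]
    by_cases hc : ((i == 0 || !(PySem.List.pyGetD vals (i - 1) 0 == PySem.List.pyGetD vals i 0 - 1)) &&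
         (i == (vals.length : Int) - 1 || !(PySem.List.pyGetD vals (i + 1) 0 == PySem.List.pyGetD vals i 0 + 1))) = true
    · rw [if_pos hc]
      simp only [pysem, List.mem_cons]
      constructor
      · rintro ((hs | rfl) | hrest)
        · exact Or.inl hs
        · exact Or.inr ⟨i, Or.inl rfl, hc, rfl⟩
        · obtain ⟨j, hj, hg, hv⟩ := hrest
          exact Or.inr ⟨j, Or.inr hj, hg, hv⟩
      · rintro (hs | ⟨j, (rfl | hj), hg, hv⟩)
        · exact Or.inl (Or.inl hs)
        · exact Or.inl (Or.inr hv.symm)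
        · exact Or.inr ⟨j, hj, hg, hv⟩
    · rw [if_neg hc]
      constructor
      · rintro (hs | hrest)
        · exact Or.inl hs
        · obtain ⟨j, hj, hg, hv⟩ := hrest
          exact Or.inr ⟨j, List.mem_cons_of_mem _ hj, hg, hv⟩
      · rintro (hs | ⟨j, hj, hg, hv⟩)
        · exact Or.inl hs
        · rcases List.mem_cons.1 hj with rfl | hj
          · exact absurd hg hc
          · exact Or.inr ⟨j, hj, hg, hv⟩


theorem guard_iff (vals : List Int) (hp : vals.Pairwise (· < ·)) (x : Int) (hx : x ∈ vals) :
    (∃ i ∈ PySem.List.pyRange 0 (vals.length : Int) 1,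
      ((i == 0 || !(PySem.List.pyGetD vals (i - 1) 0 == PySem.List.pyGetD vals i 0 - 1)) &&
       (i == (vals.length : Int) - 1 || !(PySem.List.pyGetD vals (i + 1) 0 == PySem.List.pyGetD vals i 0 + 1))) = true
      ∧ PySem.List.pyGetD vals i 0 = x)
    ↔ ((x + 1) ∉ vals ∧ (x - 1) ∉ vals) := by
  have hmono : ∀ p q (hpq : p ≤ q) (hq : q < vals.length), vals[p]'(by omega) ≤ vals[q]'hq := by
    intro p q hpq hq
    rcases Nat.lt_or_ge p q with h | h
    · exact le_of_lt ((List.pairwise_iff_getElem.1 hp) p q (by omega) hq h)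
    · have : p = q := by omega
      subst this; rfl
  have hstrict : ∀ p q (hpq : p < q) (hq : q < vals.length), vals[p]'(by omega) < vals[q]'hq :=
    fun p q hpq hq => (List.pairwise_iff_getElem.1 hp) p q (by omega) hq hpq
  constructor
  · rintro ⟨i, hi, hg, hv⟩
    rw [PySem.List.mem_pyRange_one] at hi
    have h0 : (0:Int) ≤ i := hi.1
    have hkl : i.toNat < vals.length := by omega
    rw [PySem.List.pyGetD_eq_getElem vals 0 h0 (by exact_mod_cast hi.2)] at hg hv
    simp only [Bool.and_eq_true, Bool.or_eq_true, beq_iff_eq, Bool.not_eq_true',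
      beq_eq_false_iff_ne, ne_eq] at hg
    obtain ⟨hg1, hg2⟩ := hg
    constructor
    · intro hmem
      obtain ⟨j, hj, hvj⟩ := List.mem_iff_getElem.1 hmem
      have hkj : i.toNat < j := by
        by_contra hle
        have := hmono j i.toNat (by omega) hkl
        omega
      have hi2 : i ≠ (vals.length : Int) - 1 := by
        intro h; omega
      rcases hg2 with h | h
      · exact hi2 h
      · have hsucc : i.toNat + 1 < vals.length := by omega
        rw [show i + 1 = ((i.toNat + 1 : Nat) : Int) by omega,
          PySem.List.pyGetD_eq_getElem vals 0 (by omega) (by omega)] at h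
        have e1 : vals[i.toNat] < vals[(((i.toNat+1:Nat):Int)).toNat]'(by omega) :=
          hstrict _ _ (by omega) _
        have e2 : vals[(((i.toNat+1:Nat):Int)).toNat]'(by omega) ≤ vals[j] :=
          hmono _ _ (by omega) hj
        rw [hv] at e1
        rw [hvj] at e2
        simp only [Int.toNat_natCast] at h e1 e2
        omega
    · intro hmem
      obtain ⟨j, hj, hvj⟩ := List.mem_iff_getElem.1 hmem
      have hkj : j < i.toNat := by
        by_contra hle
        have := hmono i.toNat j (by omega) hj
        omega
      have hi1 : i ≠ 0 := by intro h; omega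
      rcases hg1 with h | h
      · exact hi1 h
      · have hpred : i.toNat - 1 < vals.length := by omega
        rw [show i - 1 = ((i.toNat - 1 : Nat) : Int) by omega,
          PySem.List.pyGetD_eq_getElem vals 0 (by omega) (by omega)] at h
        have e1 : vals[(((i.toNat-1:Nat):Int)).toNat]'(by omega) < vals[i.toNat] :=
          hstrict _ _ (by omega) _
        have e2 : vals[j] ≤ vals[(((i.toNat-1:Nat):Int)).toNat]'(by omega) :=
          hmono _ _ (by omega) (by omega)
        rw [hv] at e1
        rw [hvj] at e2
        simp only [Int.toNat_natCast] at h e1 e2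
        omega
  · rintro ⟨h1, h2⟩
    obtain ⟨k, hkl, hvk⟩ := List.mem_iff_getElem.1 hx
    refine ⟨(k : Int), ?_, ?_, ?_⟩
    · rw [PySem.List.mem_pyRange_one]; exact ⟨by omega, by omega⟩
    · rw [PySem.List.pyGetD_eq_getElem vals (i := (k:Int)) 0 (by omega) (by omega)]
      simp only [Int.toNat_natCast, hvk]
      simp only [Bool.and_eq_true, Bool.or_eq_true, beq_iff_eq, Bool.not_eq_true',
        beq_eq_false_iff_ne, ne_eq]
      constructor
      · rcases Nat.eq_zero_or_pos k with rfl | hk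
        · exact Or.inl rfl
        · refine Or.inr ?_
          rw [show (k:Int) - 1 = ((k - 1 : Nat) : Int) by omega,
            PySem.List.pyGetD_eq_getElem vals 0 (by omega) (by omega)]
          intro hcontra
          exact h2 (hcontra ▸ List.getElem_mem _)
      · rcases Nat.lt_or_ge (k+1) vals.length with hk | hk
        · refine Or.inr ?_
          rw [show (k:Int) + 1 = ((k + 1 : Nat) : Int) by omega,
            PySem.List.pyGetD_eq_getElem vals 0 (by omega) (by omega)]
          intro hcontra
          exact h1 (hcontra ▸ List.getElem_mem _)
        · exact Or.inl (by omega)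
    · rw [PySem.List.pyGetD_eq_getElem vals 0 (by omega) (by omega)]
      simpa using hvk

theorem contains_iff_mem (s : PySem.Set Int) (x : Int) : PySem.Set.contains s x = true ↔ x ∈ s := by
  simp [PySem.Set.contains]

theorem findUniqueNums_spec' (nums : List Int) :
    findUniqueNums nums = findUniqueNums_alt nums := by
  simp only [findUniqueNums, findUniqueNums_alt]
  rw [PySem.List.foldl_pyRange_zero_pyGetD' nums 0
    (fun (st : PySem.Set Int × List Int) x =>
      if !(st.1.contains (x + 1)) && !(st.1.contains (x - 1)) then
        (st.1, st.2 ++ [x])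
      else (PySem.Set.add st.1 x, st.2)) (PySem.Set.ofList nums, [])]
  rw [aFold_filter nums (PySem.Set.ofList nums) []
    (fun x hx => (contains_iff_mem _ x).2 ((PySem.Set.mem_ofList nums x).2 hx))]
  simp only [List.nil_append]
  refine List.filter_congr ?_
  intro x hxnums
  set vals : List Int := PySem.List.sorted (PySem.Set.ofList nums) (fun x => x) false with hvals
  have hpair : vals.Pairwise (· < ·) := PySem.List.sorted_ofList_pairwise_lt nums
  have hmemvals : ∀ y : Int, y ∈ vals ↔ y ∈ nums := by
    intro y
    rw [hvals, PySem.List.mem_sorted, PySem.Set.mem_ofList]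
  rw [Bool.eq_iff_iff]
  rw [contains_iff_mem]
  rw [lonelyFold_mem]
  simp only [PySem.Set.empty, List.not_mem_nil, false_or]
  rw [guard_iff vals hpair x ((hmemvals x).2 hxnums)]
  simp only [Bool.and_eq_true, Bool.not_eq_true', ← Bool.not_eq_true]
  rw [contains_iff_mem, contains_iff_mem, PySem.Set.mem_ofList, PySem.Set.mem_ofList,
    hmemvals, hmemvals]

-- ===== VERDICT (by name: the statement is the Claim_ definition above) =====
theorem findUniqueNums_spec : Claim_equal_findUniqueNums := by
  intro nums _
  exact findUniqueNums_spec' nums
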